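-- pv_equiv track=rewrite | github.com/DragonMineZ/dragonminez-ai | src/bulmaai/cogs/log_parser.py | _looks_like_mc_log
-- ===== SOURCE A (Python) =====
-- def _looks_like_mc_log(text: str) -> bool:
--     """Return True if the first portion of *text* contains Minecraft-related keywords."""
--     indicators = (
--         "minecraft",
--         "forge",
--         "modlauncher",
--         "fabricloader",
--         "net.minecraftforge",
--         "cpw.mods",
--         "[main/info]",
--         "[main/debug]",
--         "[render thread/",
--         "[server thread/",
--     )
--     lower = text[:8000].lower()
--     return any(ind in lower for ind in indicators)
-- ===== SOURCE B (Python) =====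
-- _KEYWORDS = (
--     "minecraft",
--     "forge",
--     "modlauncher",
--     "fabricloader",
--     "net.minecraftforge",
--     "cpw.mods",
--     "[main/info]",
--     "[main/debug]",
--     "[render thread/",
--     "[server thread/",
-- )
--
--
-- def _looks_like_mc_log(text: str) -> bool:
--     """Single left-to-right scan of the lowered prefix: at each position test
--     whether any keyword starts there, instead of ten independent substring scans."""
--     prefix = text[:8000].lower()
--     for i in range(len(prefix)):
--         for kw in _KEYWORDS:
--             if prefix.startswith(kw, i):
--                 return True
--     return False
-- ===== Notes on version B (the rewrite author's own statement) =====
-- stated objective: alternative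
-- what changed: Replaces A's any() over ten independent per-keyword substring scans by a single left-to-right position scan of the lowered prefix that tests prefix.startswith(kw, i) for every keyword at each position, short-circuiting at the first matching position.
import Mathlib
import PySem

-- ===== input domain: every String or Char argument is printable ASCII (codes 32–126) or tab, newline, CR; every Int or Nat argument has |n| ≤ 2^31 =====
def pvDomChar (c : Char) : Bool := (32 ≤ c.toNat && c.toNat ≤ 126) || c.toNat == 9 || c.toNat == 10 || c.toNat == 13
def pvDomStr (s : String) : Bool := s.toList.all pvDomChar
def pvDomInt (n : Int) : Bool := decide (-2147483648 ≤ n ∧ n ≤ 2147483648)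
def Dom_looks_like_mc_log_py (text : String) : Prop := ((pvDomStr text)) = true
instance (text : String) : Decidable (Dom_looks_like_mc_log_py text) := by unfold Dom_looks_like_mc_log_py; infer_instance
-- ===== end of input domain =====

-- B replaces A's ten independent substring scans of the prefix by one left-to-right
-- position scan that tests every keyword at each position (objective: alternative).

-- ===== PORT A =====
def mcIndicators : List String :=
  ["minecraft", "forge", "modlauncher", "fabricloader", "net.minecraftforge",
   "cpw.mods", "[main/info]", "[main/debug]", "[render thread/", "[server thread/"]

def looks_like_mc_log_py (text : String) : Bool :=
  let lower := PySem.Str.lower (PySem.Str.slice text none (some 8000))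
  mcIndicators.any (fun ind => PySem.Str.isIn ind lower)

-- ===== PORT B =====
def mcKeywords : List (List Char) := mcIndicators.map String.toList

-- the position loop: at each suffix (position i) test every keyword, else advance
def mcScan : List Char → Bool
  | [] => false
  | c :: rest =>
    if mcKeywords.any (fun kw => PySem.Chars.startswith (c :: rest) kw) then true
    else mcScan rest

def looks_like_mc_log_py_alt (text : String) : Bool :=
  mcScan (PySem.Chars.lower (PySem.List.slice text.toList none (some 8000)))

-- ===== PRECONDITION & SPEC =====
def Spec_looks_like_mc_log_py (text : String) (out : Bool) : Prop := out = looks_like_mc_log_py_alt text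
instance (text : String) (out : Bool) : Decidable (Spec_looks_like_mc_log_py text out) := by unfold Spec_looks_like_mc_log_py; infer_instance

-- ===== CLAIM (what is proved, stated in full; the proofs are below) =====
def Claim_equal_looks_like_mc_log_py : Prop := ∀ (text : String), Dom_looks_like_mc_log_py text → Spec_looks_like_mc_log_py text (looks_like_mc_log_py text)

-- ===== LEMMAS AND PROOFS =====

theorem mcKeywords_ne_nil : ∀ kw ∈ mcKeywords, kw ≠ [] := by decide

theorem mcScan_iff (s : List Char) :
    mcScan s = true ↔ ∃ kw ∈ mcKeywords, kw <:+: s := by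
  induction s with
  | nil =>
    simp only [mcScan]
    constructor
    · intro h; exact absurd h (by simp)
    · rintro ⟨kw, hkw, hinf⟩
      exact absurd (List.eq_nil_of_infix_nil hinf) (mcKeywords_ne_nil kw hkw)
  | cons c rest ih =>
    simp only [mcScan]
    by_cases h : mcKeywords.any (fun kw => PySem.Chars.startswith (c :: rest) kw) = true
    · simp only [h, if_true, true_iff]
      rcases List.any_eq_true.mp h with ⟨kw, hkw, hsw⟩
      exact ⟨kw, hkw, ((PySem.Chars.startswith_iff _ _).mp hsw).isInfix⟩
    · rw [if_neg h, ih]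
      constructor
      · rintro ⟨kw, hkw, hinf⟩; exact ⟨kw, hkw, List.infix_cons hinf⟩
      · rintro ⟨kw, hkw, hinf⟩
        rcases List.infix_cons_iff.mp hinf with hpre | hinf'
        · exact absurd (List.any_eq_true.mpr
            ⟨kw, hkw, (PySem.Chars.startswith_iff _ _).mpr hpre⟩) h
        · exact ⟨kw, hkw, hinf'⟩

-- ===== VERDICT (by name: the statement is the Claim_ definition above) =====
theorem looks_like_mc_log_py_spec : Claim_equal_looks_like_mc_log_py := by
  intro text _
  unfold Spec_looks_like_mc_log_py looks_like_mc_log_py looks_like_mc_log_py_alt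
  rw [Bool.eq_iff_iff, mcScan_iff]
  simp only [List.any_eq_true, PySem.Str.isIn_iff_infix]
  constructor
  · rintro ⟨ind, hind, hinf⟩
    refine ⟨ind.toList, List.mem_map_of_mem hind, ?_⟩
    simpa [pysem] using hinf
  · rintro ⟨kw, hkw, hinf⟩
    rcases List.mem_map.mp hkw with ⟨ind, hind, rfl⟩
    exact ⟨ind, hind, by simpa [pysem] using hinf⟩
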